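-- pv_equiv track=rewrite | github.com/evanphoward/AdventOfCode | AOC_24/Day2/main.py | check
-- ===== SOURCE A (Python) =====
-- def check(nums, remove):
--     if remove != -1:
--         nums = nums[:remove] + nums[remove+1:]
--     if not (nums == sorted(nums) or nums == sorted(nums)[::-1]):
--         return False
--     good = True
--     for i in range(len(nums) - 1):
--         if abs(nums[i] - nums[i + 1]) > 3 or nums[i] == nums[i + 1]:
--             good = False
--     return good
-- ===== SOURCE B (Python) =====
-- def check(nums, remove):
--     if remove != -1:
--         nums = nums[:remove] + nums[remove+1:]
--     up = down = True
--     for prev, cur in zip(nums, nums[1:]):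
--         d = cur - prev
--         if not (1 <= d <= 3):
--             up = False
--         if not (-3 <= d <= -1):
--             down = False
--     return up or down
-- ===== Notes on version B (the rewrite author's own statement) =====
-- stated objective: faster
-- what changed: Replaces the sort-and-compare monotonicity test plus a separate index loop over abs-differences with a single linear pass over adjacent pairs that tracks two flags (all diffs in [1,3] / all in [-3,-1]).
import Mathlib
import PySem

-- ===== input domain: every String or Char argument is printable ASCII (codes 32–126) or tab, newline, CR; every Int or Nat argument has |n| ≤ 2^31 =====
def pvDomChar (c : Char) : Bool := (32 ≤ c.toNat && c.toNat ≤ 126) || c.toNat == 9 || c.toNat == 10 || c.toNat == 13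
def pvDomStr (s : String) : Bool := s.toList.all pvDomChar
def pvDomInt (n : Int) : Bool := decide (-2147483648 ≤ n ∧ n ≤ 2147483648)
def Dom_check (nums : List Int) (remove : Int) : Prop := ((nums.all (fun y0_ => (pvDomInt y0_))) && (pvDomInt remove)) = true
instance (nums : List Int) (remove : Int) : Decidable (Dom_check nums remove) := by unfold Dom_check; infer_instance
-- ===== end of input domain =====

-- B replaces A's sort-and-compare monotonicity test plus a separate index loop over
-- absolute differences by a single linear pass over adjacent pairs tracking two flags.

-- ===== PORT A =====
def check (nums : List Int) (remove : Int) : Bool :=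
  let nums := if remove ≠ -1
    then PySem.List.slice nums none (some remove) ++ PySem.List.slice nums (some (remove + 1)) none
    else nums
  if !(decide (nums = PySem.List.sorted nums (fun x => x)) ||
       decide (nums = ((PySem.List.slice? (PySem.List.sorted nums (fun x => x)) none none (-1)).getD [])))
  then false
  else
    (PySem.List.pyRange 0 ((nums.length : Int) - 1)).foldl
      (fun good i =>
        if 3 < |PySem.List.pyGetD nums i 0 - PySem.List.pyGetD nums (i + 1) 0| ∨
           PySem.List.pyGetD nums i 0 = PySem.List.pyGetD nums (i + 1) 0
        then false else good)
      true

-- ===== PORT B =====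
def check_alt (nums : List Int) (remove : Int) : Bool :=
  let nums := if remove ≠ -1
    then PySem.List.slice nums none (some remove) ++ PySem.List.slice nums (some (remove + 1)) none
    else nums
  let st := (nums.zip (PySem.List.slice nums (some 1) none)).foldl
    (fun (st : Bool × Bool) (pr : Int × Int) =>
      let d := pr.2 - pr.1
      (if ¬(1 ≤ d ∧ d ≤ 3) then false else st.1,
       if ¬(-3 ≤ d ∧ d ≤ -1) then false else st.2))
    (true, true)
  st.1 || st.2

-- ===== PRECONDITION & SPEC =====
def Spec_check (nums : List Int) (remove : Int) (out : Bool) : Prop := out = check_alt nums remove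
instance (nums : List Int) (remove : Int) (out : Bool) : Decidable (Spec_check nums remove out) := by unfold Spec_check; infer_instance

-- ===== CLAIM (what is proved, stated in full; the proofs are below) =====
def Claim_equal_check : Prop := ∀ (nums : List Int) (remove : Int), Dom_check nums remove → Spec_check nums remove (check nums remove)

-- ===== LEMMAS AND PROOFS =====

-- A's loop: a once-false flag stays false, so the fold is an `all`.
theorem foldl_latch {α : Type} (P : α → Prop) [DecidablePred P] (l : List α) (g : Bool) :
    l.foldl (fun good i => if P i then false else good) g = (g && l.all fun i => !decide (P i)) := by
  induction l generalizing g with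
  | nil => simp
  | cons a t ih =>
    rw [List.foldl_cons, ih]
    by_cases h : P a <;> simp [h]

-- B's loop: two once-false flags, so the fold is a pair of `all`s.
theorem foldl_pairFlags {α : Type} (p q : α → Prop) [DecidablePred p] [DecidablePred q]
    (l : List α) (u d : Bool) :
    l.foldl (fun st x => (if p x then false else st.1, if q x then false else st.2)) (u, d)
    = (u && l.all (fun x => !decide (p x)), d && l.all (fun x => !decide (q x))) := by
  induction l generalizing u d with
  | nil => simp
  | cons a t ih =>
    rw [List.foldl_cons, ih]
    by_cases h1 : p a <;> by_cases h2 : q a <;> simp [h1, h2]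

theorem forall_zip_tail_iff (p : Int → Int → Prop) (L : List Int) :
    (∀ pr ∈ L.zip L.tail, p pr.1 pr.2) ↔ L.IsChain p := by
  induction L with
  | nil => simp
  | cons a t ih =>
    cases t with
    | nil => simp
    | cons b t' =>
      rw [List.isChain_cons_cons, ← ih]
      simp [List.zip_cons_cons]

theorem isChain_and {R S : Int → Int → Prop} {l : List Int}
    (hR : l.IsChain R) (hS : l.IsChain S) : l.IsChain (fun a b => R a b ∧ S a b) := by
  rw [List.isChain_iff_getElem] at *
  exact fun i hi => ⟨hR i hi, hS i hi⟩

theorem range_all_iff (L : List Int) :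
    ((PySem.List.pyRange 0 ((L.length : Int) - 1)).all (fun i =>
       !(decide (3 < |PySem.List.pyGetD L i 0 - PySem.List.pyGetD L (i + 1) 0| ∨
          PySem.List.pyGetD L i 0 = PySem.List.pyGetD L (i + 1) 0))) = true)
    ↔ L.IsChain (fun a b => |a - b| ≤ 3 ∧ a ≠ b) := by
  rw [List.all_eq_true, List.isChain_iff_getElem]
  constructor
  · intro h j hj
    have hm : (j : Int) ∈ PySem.List.pyRange 0 ((L.length : Int) - 1) :=
      PySem.List.mem_pyRange_one.mpr ⟨by positivity, by omega⟩
    have hx := h _ hm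
    rw [PySem.List.pyGetD_eq_getElem L 0 (by positivity) (by omega),
        PySem.List.pyGetD_eq_getElem L 0 (by positivity) (by omega)] at hx
    simp only [Bool.not_eq_true', decide_eq_false_iff_not, not_or, not_lt] at hx
    have hi1 : ((j : Int)).toNat = j := by omega
    have hi2 : ((j : Int) + 1).toNat = j + 1 := by omega
    simp only [hi1, hi2] at hx
    exact ⟨hx.1, hx.2⟩
  · intro h i hm
    obtain ⟨h0, h1⟩ := PySem.List.mem_pyRange_one.mp hm
    rw [PySem.List.pyGetD_eq_getElem L 0 h0 (by omega),
        PySem.List.pyGetD_eq_getElem L 0 (by omega) (by omega)]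
    have hx := h i.toNat (by omega)
    have hi2 : (i + 1).toNat = i.toNat + 1 := by omega
    simp only [hi2, Bool.not_eq_true', decide_eq_false_iff_not, not_or, not_lt]
    exact ⟨hx.1, hx.2⟩

theorem eq_sorted_iff (L : List Int) :
    L = PySem.List.sorted L (fun x => x) ↔ L.Pairwise (fun a b : Int => a ≤ b) := by
  constructor
  · intro h
    have hp := PySem.List.sorted_pairwise L (fun x => x)
    rw [← h] at hp
    simpa using hp
  · intro h
    exact (PySem.List.sorted_eq_self_of_pairwise L _ (by simpa using h)).symm

theorem eq_revsorted_iff (L : List Int) :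
    L = (PySem.List.sorted L (fun x => x)).reverse ↔ L.Pairwise (fun a b : Int => b ≤ a) := by
  constructor
  · intro h
    have hp := PySem.List.sorted_pairwise L (fun x => x)
    have hr : (PySem.List.sorted L (fun x => x)).reverse.Pairwise (fun a b : Int => b ≤ a) :=
      List.pairwise_reverse.mpr (by simpa using hp)
    rw [← h] at hr
    exact hr
  · intro h
    have hpw : L.reverse.Pairwise (fun a b : Int => a ≤ b) := List.pairwise_reverse.mpr h
    have hs := PySem.List.sorted_id_eq_of_perm_of_pairwise L L.reverse (List.reverse_perm L) hpw
    rw [hs, List.reverse_reverse]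

theorem main_iff (L : List Int) :
    ((L.Pairwise (fun a b : Int => a ≤ b) ∨ L.Pairwise (fun a b : Int => b ≤ a)) ∧
      L.IsChain (fun a b => |a - b| ≤ 3 ∧ a ≠ b))
    ↔ (L.IsChain (fun a b : Int => 1 ≤ b - a ∧ b - a ≤ 3) ∨
       L.IsChain (fun a b : Int => -3 ≤ b - a ∧ b - a ≤ -1)) := by
  rw [← List.isChain_iff_pairwise, ← List.isChain_iff_pairwise]
  constructor
  · rintro ⟨h1 | h1, h2⟩
    · exact Or.inl ((isChain_and h1 h2).imp fun a b hab => by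
        obtain ⟨hle, habs, hne⟩ := hab; rw [abs_le] at habs; omega)
    · exact Or.inr ((isChain_and h1 h2).imp fun a b hab => by
        obtain ⟨hle, habs, hne⟩ := hab; rw [abs_le] at habs; omega)
  · rintro (h | h)
    · exact ⟨Or.inl (h.imp fun a b hp => by omega),
        h.imp fun a b hp => ⟨by rw [abs_le]; omega, by omega⟩⟩
    · exact ⟨Or.inr (h.imp fun a b hp => by omega),
        h.imp fun a b hp => ⟨by rw [abs_le]; omega, by omega⟩⟩

theorem core_eq (L : List Int) :
    (if !(decide (L = PySem.List.sorted L (fun x => x)) ||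
          decide (L = ((PySem.List.slice? (PySem.List.sorted L (fun x => x)) none none (-1)).getD [])))
     then false
     else
       (PySem.List.pyRange 0 ((L.length : Int) - 1)).foldl
         (fun good i =>
           if 3 < |PySem.List.pyGetD L i 0 - PySem.List.pyGetD L (i + 1) 0| ∨
              PySem.List.pyGetD L i 0 = PySem.List.pyGetD L (i + 1) 0
           then false else good)
         true)
    = (let st := (L.zip (PySem.List.slice L (some 1) none)).foldl
         (fun (st : Bool × Bool) (pr : Int × Int) =>
           let d := pr.2 - pr.1
           (if ¬(1 ≤ d ∧ d ≤ 3) then false else st.1,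
            if ¬(-3 ≤ d ∧ d ≤ -1) then false else st.2))
         (true, true)
       st.1 || st.2) := by
  show _ = (((L.zip (PySem.List.slice L (some 1) none)).foldl
      (fun (st : Bool × Bool) (pr : Int × Int) =>
        (if ¬(1 ≤ pr.2 - pr.1 ∧ pr.2 - pr.1 ≤ 3) then false else st.1,
         if ¬(-3 ≤ pr.2 - pr.1 ∧ pr.2 - pr.1 ≤ -1) then false else st.2)) (true, true)).1
    || ((L.zip (PySem.List.slice L (some 1) none)).foldl
      (fun (st : Bool × Bool) (pr : Int × Int) =>
        (if ¬(1 ≤ pr.2 - pr.1 ∧ pr.2 - pr.1 ≤ 3) then false else st.1,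
         if ¬(-3 ≤ pr.2 - pr.1 ∧ pr.2 - pr.1 ≤ -1) then false else st.2)) (true, true)).2)
  rw [PySem.List.slice?_none_none_neg_one, PySem.List.slice_from_one,
      foldl_latch (fun i => 3 < |PySem.List.pyGetD L i 0 - PySem.List.pyGetD L (i + 1) 0| ∨
        PySem.List.pyGetD L i 0 = PySem.List.pyGetD L (i + 1) 0),
      foldl_pairFlags (fun pr : Int × Int => ¬(1 ≤ pr.2 - pr.1 ∧ pr.2 - pr.1 ≤ 3))
        (fun pr : Int × Int => ¬(-3 ≤ pr.2 - pr.1 ∧ pr.2 - pr.1 ≤ -1))]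
  rw [Bool.eq_iff_iff]
  simp only [Option.getD_some, Bool.true_and, Bool.or_eq_true]
  split_ifs with hc
  · simp only [Bool.not_eq_true', Bool.or_eq_false_iff, decide_eq_false_iff_not] at hc
    constructor
    · intro h; simp at h
    · rintro (h | h)
      · have hch : L.IsChain (fun a b : Int => 1 ≤ b - a ∧ b - a ≤ 3) := by
          rw [← forall_zip_tail_iff]
          intro pr hpr
          simpa using List.all_eq_true.mp h pr hpr
        rcases ((main_iff L).mpr (Or.inl hch)).1 with h1 | h1
        · exact absurd ((eq_sorted_iff L).mpr h1) hc.1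
        · exact absurd ((eq_revsorted_iff L).mpr h1) hc.2
      · have hch : L.IsChain (fun a b : Int => -3 ≤ b - a ∧ b - a ≤ -1) := by
          rw [← forall_zip_tail_iff]
          intro pr hpr
          simpa using List.all_eq_true.mp h pr hpr
        rcases ((main_iff L).mpr (Or.inr hch)).1 with h1 | h1
        · exact absurd ((eq_sorted_iff L).mpr h1) hc.1
        · exact absurd ((eq_revsorted_iff L).mpr h1) hc.2
  · simp only [Bool.not_eq_true, Bool.not_eq_false', Bool.or_eq_true, decide_eq_true_eq] at hc
    have hmono : L.Pairwise (fun a b : Int => a ≤ b) ∨ L.Pairwise (fun a b : Int => b ≤ a) :=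
      hc.imp (eq_sorted_iff L |>.mp) (eq_revsorted_iff L |>.mp)
    rw [range_all_iff]
    constructor
    · intro hchain
      rcases (main_iff L).mp ⟨hmono, hchain⟩ with h | h
      · refine Or.inl (List.all_eq_true.mpr fun pr hpr => ?_)
        have := (forall_zip_tail_iff _ L).mpr h pr hpr
        simpa using this
      · refine Or.inr (List.all_eq_true.mpr fun pr hpr => ?_)
        have := (forall_zip_tail_iff _ L).mpr h pr hpr
        simpa using this
    · rintro (h | h)
      · refine ((main_iff L).mpr (Or.inl ?_)).2
        rw [← forall_zip_tail_iff]; intro pr hpr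
        simpa using List.all_eq_true.mp h pr hpr
      · refine ((main_iff L).mpr (Or.inr ?_)).2
        rw [← forall_zip_tail_iff]; intro pr hpr
        simpa using List.all_eq_true.mp h pr hpr

-- ===== VERDICT (by name: the statement is the Claim_ definition above) =====
theorem check_spec : Claim_equal_check := by
  intro nums remove _
  show check nums remove = check_alt nums remove
  unfold check check_alt
  exact core_eq _
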